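-- pv_equiv track=rewrite | github.com/Sedinha/APC--Computer-Algorithms-and-Programming-in-Python-- | Lists/Exercises/Q5.py | paron
-- ===== SOURCE A (Python) =====
-- def paron(L):
--     contador = 0
--     vogais = ["a","e","i","o","u","A","E","I","O","U"]
--     novoL = []
--     contador = 0
--     i = 0
--     while i < len(L):
--         for v in vogais:
--             contador += L[i].count(v)
--         if contador % 2 == 0:
--             novoL.append(L[i])
--         i += 1
--         contador = 0
--     return novoL
-- ===== SOURCE B (Python) =====
-- def paron(L):
--     vogais = set("aeiouAEIOU")
--     novoL = []
--     for s in L: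
--         count = 0
--         for c in s:
--             if c in vogais:
--                 count += 1
--         if count % 2 == 0:
--             novoL.append(s)
--     return novoL
-- ===== Notes on version B (the rewrite author's own statement) =====
-- stated objective: faster
-- what changed: B scans each string once, counting characters that are in a vowel set, instead of A's index-based while loop that scans every string ten times via .count, once per vowel.
import Mathlib
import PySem

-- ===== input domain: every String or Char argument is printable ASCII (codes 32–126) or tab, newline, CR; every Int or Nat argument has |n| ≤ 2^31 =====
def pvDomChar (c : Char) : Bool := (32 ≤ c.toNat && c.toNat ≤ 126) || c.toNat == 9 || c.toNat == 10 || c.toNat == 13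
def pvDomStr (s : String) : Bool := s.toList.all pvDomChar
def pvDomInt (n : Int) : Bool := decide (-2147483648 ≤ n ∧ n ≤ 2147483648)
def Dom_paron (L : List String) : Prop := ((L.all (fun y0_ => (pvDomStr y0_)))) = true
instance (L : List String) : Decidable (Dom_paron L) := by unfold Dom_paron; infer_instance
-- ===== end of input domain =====

-- B keeps strings with an even vowel count in one pass over each string's characters,
-- instead of A's index-based while loop calling .count once per vowel (ten scans per string).

-- ===== PORT A =====
def paron (L : List String) : List String :=
  (PySem.List.pyRange 0 L.length 1).foldl
    (fun novoL i =>
      if PySem.Int.mod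
          ((["a","e","i","o","u","A","E","I","O","U"] : List String).foldl
            (fun contador v => contador + (PySem.Str.count (PySem.List.pyGetD L i "") v : Int)) 0) 2 = 0
      then novoL ++ [PySem.List.pyGetD L i ""] else novoL)
    []

-- ===== PORT B =====
def pvVowelSet : PySem.Set Char := PySem.Set.ofList "aeiouAEIOU".toList

def paron_alt (L : List String) : List String :=
  L.foldl
    (fun novoL s =>
      if PySem.Int.mod
          (s.toList.foldl (fun count c => if PySem.Set.contains pvVowelSet c then count + 1 else count) 0) 2 = 0
      then novoL ++ [s] else novoL)
    []

-- ===== PRECONDITION & SPEC =====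
def Spec_paron (L : List String) (out : List String) : Prop := out = paron_alt L
instance (L : List String) (out : List String) : Decidable (Spec_paron L out) := by unfold Spec_paron; infer_instance

-- ===== CLAIM (what is proved, stated in full; the proofs are below) =====
def Claim_equal_paron : Prop := ∀ (L : List String), Dom_paron L → Spec_paron L (paron L)

-- ===== LEMMAS AND PROOFS =====

-- counting one single-character substring is counting that character
lemma go_single (c : Char) : ∀ (l : List Char) (fuel acc : Nat), l.length ≤ fuel →
    PySem.Chars.count.go [c] fuel l acc = acc + l.count c := by
  intro l
  induction l with
  | nil =>
    intro fuel acc _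
    cases fuel <;> simp [PySem.Chars.count.go]
  | cons c' t ih =>
    intro fuel acc h
    cases fuel with
    | zero => simp at h
    | succ f =>
      simp only [PySem.Chars.count.go, List.isPrefixOf, List.count_cons]
      by_cases hc : c = c'
      · subst hc
        simp [ih f (acc + 1) (by simpa using h)]
        omega
      · have hb : (c == c') = false := by simp [hc]
        simp [hb, ih f acc (by simpa using h), Ne.symm hc]

lemma count_single (s : String) (c : Char) (v : String) (hv : v.toList = [c]) :
    PySem.Str.count s v = s.toList.count c := by
  rw [PySem.Str.count, hv]
  simpa [PySem.Chars.count] using go_single c s.toList s.toList.length 0 le_rfl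

-- the ten per-vowel counts sum to the one-pass vowel count
lemma cnt_sum (cs : List Char) :
    cs.count 'a' + cs.count 'e' + cs.count 'i' + cs.count 'o' + cs.count 'u' +
      cs.count 'A' + cs.count 'E' + cs.count 'I' + cs.count 'O' + cs.count 'U' =
    cs.countP (fun c => PySem.Set.contains pvVowelSet c) := by
  have hveq : pvVowelSet = ['a','e','i','o','u','A','E','I','O','U'] := by decide
  induction cs with
  | nil => simp
  | cons c t ih =>
    simp only [List.count_cons, List.countP_cons]
    simp only [PySem.Set.contains, List.contains_eq_mem] at ih ⊢
    by_cases hmem : c ∈ pvVowelSet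
    · have hl : c ∈ (['a','e','i','o','u','A','E','I','O','U'] : List Char) := hveq ▸ hmem
      fin_cases hl <;> simp [hmem] <;> omega
    · have hl : c ∉ (['a','e','i','o','u','A','E','I','O','U'] : List Char) := hveq ▸ hmem
      simp only [List.mem_cons, List.not_mem_nil, or_false, not_or] at hl
      obtain ⟨h1,h2,h3,h4,h5,h6,h7,h8,h9,h10⟩ := hl
      simp [hmem, h1, h2, h3, h4, h5, h6, h7, h8, h9, h10, ih]

-- per string: A's accumulated vowel total equals B's one-pass count
lemma per_string (s : String) :
    (["a","e","i","o","u","A","E","I","O","U"] : List String).foldl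
        (fun contador v => contador + (PySem.Str.count s v : Int)) 0 =
      s.toList.foldl (fun count c => if PySem.Set.contains pvVowelSet c then count + 1 else count) 0 := by
  rw [PySem.List.foldl_if_add_one]
  simp only [List.foldl,
    count_single s 'a' "a" rfl, count_single s 'e' "e" rfl, count_single s 'i' "i" rfl,
    count_single s 'o' "o" rfl, count_single s 'u' "u" rfl, count_single s 'A' "A" rfl,
    count_single s 'E' "E" rfl, count_single s 'I' "I" rfl, count_single s 'O' "O" rfl,
    count_single s 'U' "U" rfl]
  rw [← cnt_sum s.toList]
  push_cast
  ring

-- ===== VERDICT (by name: the statement is the Claim_ definition above) =====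
theorem paron_spec : Claim_equal_paron := by
  intro L _
  unfold Spec_paron paron paron_alt
  rw [PySem.List.foldl_pyRange_zero_pyGetD' L ""
    (fun novoL s =>
      if PySem.Int.mod
          ((["a","e","i","o","u","A","E","I","O","U"] : List String).foldl
            (fun contador v => contador + (PySem.Str.count s v : Int)) 0) 2 = 0
      then novoL ++ [s] else novoL) []]
  have hf : (fun (novoL : List String) (s : String) =>
      if PySem.Int.mod
          ((["a","e","i","o","u","A","E","I","O","U"] : List String).foldl
            (fun contador v => contador + (PySem.Str.count s v : Int)) 0) 2 = 0
      then novoL ++ [s] else novoL) =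
    (fun (novoL : List String) (s : String) =>
      if PySem.Int.mod
          (s.toList.foldl (fun count c => if PySem.Set.contains pvVowelSet c then count + 1 else count) 0) 2 = 0
      then novoL ++ [s] else novoL) := by
    funext novoL s
    rw [per_string s]
  rw [hf]
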